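-- pv_equiv track=rewrite | github.com/uxentio/books-pipeline | src/utils_isbn.py | validate_isbn10
-- ===== SOURCE A (Python) =====
-- def clean_isbn(isbn_str):
--     """Limpia un string de ISBN eliminando guiones y espacios"""
--     if not isbn_str:
--         return None
--     return ''.join(c for c in str(isbn_str) if c.isdigit() or c.upper() == 'X')
--
-- def validate_isbn10(isbn):
--     """
--     Valida un ISBN-10
--     Returns: True si es válido, False si no
--     """
--     if not isbn:
--         return False
--
--     isbn = clean_isbn(isbn)
--
--     if len(isbn) != 10:
--         return False
--
--     try:
--         # Algoritmo de validación ISBN-10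
--         total = 0
--         for i, char in enumerate(isbn[:-1]):
--             total += int(char) * (10 - i)
--
--         check_char = isbn[-1]
--         if check_char.upper() == 'X':
--             check_value = 10
--         else:
--             check_value = int(check_char)
--
--         total += check_value
--         return total % 11 == 0
--     except:
--         return False
-- ===== SOURCE B (Python) =====
-- def validate_isbn10(isbn):
--     """
--     Valida un ISBN-10
--     Returns: True si es válido, False si no
--     """
--     if not isbn:
--         return False
--     cleaned = ''.join(c for c in str(isbn) if c.isdigit() or c.upper() == 'X')
--     if len(cleaned) != 10:
--         return False
--     # Horner-style: s is the running sum of values, t the sum of the running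
--     # sums; after 10 steps t == sum(value_i * (10 - i)), the ISBN-10 total.
--     s = 0
--     t = 0
--     for i, char in enumerate(cleaned):
--         if i == 9 and char.upper() == 'X':
--             v = 10
--         elif char.isdigit():
--             v = int(char)
--         else:
--             return False  # 'X'/'x' before the last position
--         s += v
--         t += s
--     return t % 11 == 0
-- ===== Notes on version B (the rewrite author's own statement) =====
-- stated objective: alternative
-- what changed: The weighted-sum loop (int(char)*(10-i) over the first nine chars plus a separate check-digit step) is replaced by a single Horner-style pass over all ten cleaned characters maintaining two running accumulators (s += value; t += s), with no weight multiplication and no separate check-digit step.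
import Mathlib
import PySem

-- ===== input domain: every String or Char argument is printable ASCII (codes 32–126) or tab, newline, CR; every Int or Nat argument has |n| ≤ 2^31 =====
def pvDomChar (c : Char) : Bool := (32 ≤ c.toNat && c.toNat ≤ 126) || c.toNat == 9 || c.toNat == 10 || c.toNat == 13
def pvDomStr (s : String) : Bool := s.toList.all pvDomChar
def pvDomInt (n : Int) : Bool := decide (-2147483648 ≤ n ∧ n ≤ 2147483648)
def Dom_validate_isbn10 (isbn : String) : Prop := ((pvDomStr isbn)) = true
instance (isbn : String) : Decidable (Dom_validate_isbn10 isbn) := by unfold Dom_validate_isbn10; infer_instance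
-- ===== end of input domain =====

-- B replaces A's weighted-sum loop (value * (10 - i)) by a Horner-style double
-- accumulator (s += value; t += s) over all 10 cleaned characters: objective 'alternative'.

-- ===== PORT A =====

-- c.isdigit() for a single char; exact on the ASCII domain (printable + tab/nl/cr)
def pyIsDigitChar (c : Char) : Bool := '0' ≤ c && c ≤ '9'

-- c.upper() for a single char; exact on the ASCII domain
def pyUpperChar (c : Char) : Char :=
  if 'a' ≤ c && c ≤ 'z' then Char.ofNat (c.toNat - 32) else c

-- int(c) for a single char c; none = ValueError (exact on ASCII: only '0'-'9' parse)
def intOfChar? (c : Char) : Option Int :=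
  if pyIsDigitChar c then some ((c.toNat : Int) - 48) else none

-- ''.join(c for c in str(isbn_str) if c.isdigit() or c.upper() == 'X')  (clean_isbn on a nonempty string)
def cleanChars (l : List Char) : List Char :=
  l.filter (fun c => pyIsDigitChar c || pyUpperChar c == 'X')

-- the try-block loop: for i, char in enumerate(isbn[:-1]): total += int(char) * (10 - i)
-- none = the int() call raised, caught by the bare except
def loopA : List Char → Int → Int → Option Int
  | [], _, total => some total
  | c :: rest, i, total =>
    match intOfChar? c with
    | none => none
    | some d => loopA rest (i + 1) (total + d * (10 - i))

-- check_value: 10 if check_char.upper() == 'X' else int(check_char)  (none = int raised)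
def checkVal? (c : Char) : Option Int :=
  if pyUpperChar c == 'X' then some 10 else intOfChar? c

def validate_isbn10 (isbn : String) : Bool :=
  let l := isbn.toList
  if l.isEmpty then false
  else
    let cl := cleanChars l
    if cl.length ≠ 10 then false
    else
      match loopA (PySem.List.slice cl none (some (-1))) 0 0 with
      | none => false
      | some total =>
        match PySem.List.pyGet? cl (-1) with
        | none => false   -- unreachable: cl is nonempty
        | some check_char =>
          match checkVal? check_char with
          | none => false
          | some check_value => decide ((PySem.Int.mod (total + check_value) 11) = 0)

-- ===== PORT B =====

-- the single pass: s = running sum of values, t = sum of the running sums;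
-- none = an invalid character (return False inside the loop)
def loopB : List Char → Int → Int → Int → Option Int
  | [], _, _, t => some t
  | c :: rest, i, s, t =>
    let v? : Option Int :=
      if i == 9 && pyUpperChar c == 'X' then some 10
      else if pyIsDigitChar c then some ((c.toNat : Int) - 48)
      else none
    match v? with
    | none => none
    | some v => loopB rest (i + 1) (s + v) (t + s + v)

def validate_isbn10_alt (isbn : String) : Bool :=
  let l := isbn.toList
  if l.isEmpty then false
  else
    let cl := cleanChars l
    if cl.length ≠ 10 then false
    else
      match loopB cl 0 0 0 with
      | none => false
      | some t => decide ((PySem.Int.mod t 11) = 0)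

-- ===== PRECONDITION & SPEC =====
def Spec_validate_isbn10 (isbn : String) (out : Bool) : Prop := out = validate_isbn10_alt isbn
instance (isbn : String) (out : Bool) : Decidable (Spec_validate_isbn10 isbn out) := by unfold Spec_validate_isbn10; infer_instance

-- ===== CLAIM (what is proved, stated in full; the proofs are below) =====
def Claim_equal_validate_isbn10 : Prop := ∀ (isbn : String), Dom_validate_isbn10 isbn → Spec_validate_isbn10 isbn (validate_isbn10 isbn)

-- ===== LEMMAS AND PROOFS =====

-- B's double-accumulator pass over ds ++ [c], entered at index i with invariant
-- total = t + s * (10 - i), computes exactly A's loop on ds followed by A's check on c.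
lemma loopB_eq_loopA_check (ds : List Char) (c : Char) :
    ∀ (i s t total : Int), i + (ds.length : Int) = 9 → total = t + s * (10 - i) →
    loopB (ds ++ [c]) i s t =
      match loopA ds i total with
      | none => none
      | some tot =>
        match checkVal? c with
        | none => none
        | some cv => some (tot + cv) := by
  induction ds with
  | nil =>
    intro i s t total hi hinv
    have hi9 : i = 9 := by simpa using hi
    subst hi9
    simp only [List.nil_append, loopB, loopA]
    have hsel : (if (9 : Int) == 9 && pyUpperChar c == 'X' then some (10 : Int)
            else if pyIsDigitChar c then some ((c.toNat : Int) - 48) else none)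
         = checkVal? c := by
      simp [checkVal?, intOfChar?]
    rw [hsel]
    cases checkVal? c with
    | none => rfl
    | some cv => simp [hinv]
  | cons d rest ih =>
    intro i s t total hi hinv
    have hle : i ≤ 8 := by
      have := Int.natCast_nonneg rest.length
      simp only [List.length_cons] at hi
      push_cast at hi
      omega
    have hne9 : (i == 9) = false := by
      simp only [beq_eq_false_iff_ne]
      omega
    by_cases hd : pyIsDigitChar d = true
    · have hstep : loopB ((d :: rest) ++ [c]) i s t
          = loopB (rest ++ [c]) (i + 1) (s + ((d.toNat : Int) - 48)) (t + s + ((d.toNat : Int) - 48)) := by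
        simp [loopB, hne9, hd]
      have hstepA : loopA (d :: rest) i total
          = loopA rest (i + 1) (total + ((d.toNat : Int) - 48) * (10 - i)) := by
        simp [loopA, intOfChar?, hd]
      rw [hstep, hstepA]
      refine ih (i + 1) _ _ _ ?_ (by rw [hinv]; ring)
      simp only [List.length_cons] at hi
      push_cast at hi ⊢
      omega
    · simp [loopB, loopA, intOfChar?, hne9, hd]

theorem validate_isbn10_spec : Claim_equal_validate_isbn10 := by
  intro isbn _
  unfold Spec_validate_isbn10 validate_isbn10 validate_isbn10_alt
  by_cases hem : isbn.toList.isEmpty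
  · simp [hem]
  · simp only [hem]
    set cl := cleanChars isbn.toList with hcl
    by_cases hlen : cl.length = 10
    · simp only [hlen]
      have hne : cl ≠ [] := by intro h'; simp [h'] at hlen
      obtain ⟨ds, c, hsplit, hds⟩ :
          ∃ ds c, cl = ds ++ [c] ∧ ds.length = 9 := by
        refine ⟨cl.dropLast, cl.getLast hne, (List.dropLast_append_getLast hne).symm, ?_⟩
        simp [List.length_dropLast, hlen]
      rw [hsplit, PySem.List.slice_to_neg_one, PySem.List.pyGet?_neg_one_append_singleton]
      have hdrop : (ds ++ [c]).dropLast = ds := by simp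
      rw [hdrop]
      rw [loopB_eq_loopA_check ds c 0 0 0 0 (by simp [hds]) (by ring)]
      cases hA : loopA ds 0 0 with
      | none => simp
      | some total =>
        cases hc : checkVal? c with
        | none => simp [hc]
        | some cv => simp [hc]
    · simp [hlen]
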